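-- pv_equiv track=rewrite | github.com/tlfmcooper/portfolio-manager | backend/app/mcp/handlers.py | _normalize_completion_candidates
-- ===== SOURCE A (Python) =====
-- from typing import Any, Callable, Dict, Iterable
--
-- def _normalize_completion_candidates(candidates: Iterable[str], current_value: str) -> list[str]:
--     current = (current_value or "").strip().lower()
--     deduped: list[str] = []
--     seen: set[str] = set()
--     for candidate in candidates:
--         value = str(candidate).strip()
--         if not value:
--             continue
--         lowered = value.lower()
--         if lowered in seen:
--             continue
--         seen.add(lowered)
--         deduped.append(value)
--
--     if not current:
--         return deduped[:100]
--
--     prefix_matches = [value for value in deduped if value.lower().startswith(current)]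
--     fuzzy_matches = [value for value in deduped if current in value.lower() and value not in prefix_matches]
--     return (prefix_matches + fuzzy_matches)[:100]
-- ===== SOURCE B (Python) =====
-- def _normalize_completion_candidates(candidates, current_value):
--     current = (current_value or "").strip().lower()
--     seen = set()
--     deduped = []
--     prefix = []
--     fuzzy = []
--     for candidate in candidates:
--         value = str(candidate).strip()
--         if not value:
--             continue
--         lowered = value.lower()
--         if lowered in seen:
--             continue
--         seen.add(lowered)
--         if not current:
--             deduped.append(value)
--         elif lowered.startswith(current):
--             prefix.append(value)
--         elif current in lowered:
--             fuzzy.append(value)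
--     if not current:
--         return deduped[:100]
--     return (prefix + fuzzy)[:100]
-- ===== Notes on version B (the rewrite author's own statement) =====
-- stated objective: alternative
-- what changed: B fuses dedup and prefix/fuzzy classification into a single pass over the candidates (one seen-set plus three output lists), removing A's two post-hoc filter passes and the `value not in prefix_matches` inner list scan.
import Mathlib
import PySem

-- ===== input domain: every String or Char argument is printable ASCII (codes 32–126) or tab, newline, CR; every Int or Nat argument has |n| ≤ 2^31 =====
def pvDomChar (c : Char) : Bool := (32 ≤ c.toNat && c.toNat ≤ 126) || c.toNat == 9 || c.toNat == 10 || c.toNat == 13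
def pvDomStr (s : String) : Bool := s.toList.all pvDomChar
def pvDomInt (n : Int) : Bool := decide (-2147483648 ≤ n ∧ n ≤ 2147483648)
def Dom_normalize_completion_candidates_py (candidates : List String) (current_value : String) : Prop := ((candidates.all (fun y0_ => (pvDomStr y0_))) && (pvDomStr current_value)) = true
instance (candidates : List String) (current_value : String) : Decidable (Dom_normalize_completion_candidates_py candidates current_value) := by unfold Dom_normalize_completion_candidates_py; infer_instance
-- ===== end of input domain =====

-- B fuses dedup and prefix/fuzzy classification into one pass (removes A's two filter passes and the
-- `value not in prefix_matches` inner scan); equivalence of the return values is proved below.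

-- ===== PORT A =====
-- A's loop body (the body of `for candidate in candidates`), state = (deduped, seen).
def pvStepA (st : List String × PySem.Set String) (candidate : String) : List String × PySem.Set String :=
  let value := PySem.Str.strip candidate
  if value = "" then st
  else
    let lowered := PySem.Str.lower value
    if PySem.Set.contains st.2 lowered then st
    else (st.1 ++ [value], PySem.Set.add st.2 lowered)

-- `(current_value or "")` is the identity on strings; `xs[:100]` on a list with a nonnegative
-- literal bound is List.take 100 (exact).
def normalize_completion_candidates_py (candidates : List String) (current_value : String) : List String :=
  let current := PySem.Str.lower (PySem.Str.strip current_value)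
  let st := candidates.foldl pvStepA ([], PySem.Set.empty)
  let deduped := st.1
  if current = "" then deduped.take 100
  else
    let prefix_matches := deduped.filter (fun value => PySem.Str.startswith (PySem.Str.lower value) current)
    let fuzzy_matches := deduped.filter (fun value =>
      PySem.Str.isIn current (PySem.Str.lower value) && !(prefix_matches.contains value))
    (prefix_matches ++ fuzzy_matches).take 100

-- ===== PORT B =====
-- B's loop body, state = (seen, deduped, prefix, fuzzy).
def pvStepB (current : String) (st : PySem.Set String × List String × List String × List String)
    (candidate : String) : PySem.Set String × List String × List String × List String :=
  let value := PySem.Str.strip candidate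
  if value = "" then st
  else
    let lowered := PySem.Str.lower value
    if PySem.Set.contains st.1 lowered then st
    else
      let seen' := PySem.Set.add st.1 lowered
      if current = "" then (seen', st.2.1 ++ [value], st.2.2.1, st.2.2.2)
      else if PySem.Str.startswith lowered current then (seen', st.2.1, st.2.2.1 ++ [value], st.2.2.2)
      else if PySem.Str.isIn current lowered then (seen', st.2.1, st.2.2.1, st.2.2.2 ++ [value])
      else (seen', st.2.1, st.2.2.1, st.2.2.2)

def normalize_completion_candidates_py_alt (candidates : List String) (current_value : String) : List String :=
  let current := PySem.Str.lower (PySem.Str.strip current_value)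
  let st := candidates.foldl (pvStepB current) (PySem.Set.empty, [], [], [])
  if current = "" then st.2.1.take 100
  else (st.2.2.1 ++ st.2.2.2).take 100

-- ===== PRECONDITION & SPEC =====
def Spec_normalize_completion_candidates_py (candidates : List String) (current_value : String) (out : List String) : Prop := out = normalize_completion_candidates_py_alt candidates current_value
instance (candidates : List String) (current_value : String) (out : List String) : Decidable (Spec_normalize_completion_candidates_py candidates current_value out) := by unfold Spec_normalize_completion_candidates_py; infer_instance

-- ===== CLAIM (what is proved, stated in full; the proofs are below) =====
def Claim_equal_normalize_completion_candidates_py : Prop := ∀ (candidates : List String) (current_value : String), Dom_normalize_completion_candidates_py candidates current_value → Spec_normalize_completion_candidates_py candidates current_value (normalize_completion_candidates_py candidates current_value)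

-- ===== LEMMAS AND PROOFS =====

-- A's fold only ever appends to the deduped list: the accumulator factors out.
lemma pvStepA_acc (cs : List String) : ∀ (d : List String) (seen : PySem.Set String),
    cs.foldl pvStepA (d, seen) =
      (d ++ (cs.foldl pvStepA ([], seen)).1, (cs.foldl pvStepA ([], seen)).2) := by
  induction cs with
  | nil => intro d seen; simp
  | cons c cs ih =>
    intro d seen
    simp only [List.foldl_cons, pvStepA]
    split_ifs with h1 h2
    · exact ih d seen
    · exact ih d seen
    · rw [ih (([] : List String) ++ [PySem.Str.strip c]), ih (d ++ [PySem.Str.strip c])]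
      simp

-- With empty `current`, B's loop behaves exactly like A's loop (prefix/fuzzy untouched).
lemma pvStepB_empty (cs : List String) : ∀ (seen : PySem.Set String) (d p f : List String),
    cs.foldl (pvStepB "") (seen, d, p, f) =
      ((cs.foldl pvStepA (d, seen)).2, (cs.foldl pvStepA (d, seen)).1, p, f) := by
  induction cs with
  | nil => intro seen d p f; simp
  | cons c cs ih =>
    intro seen d p f
    simp only [List.foldl_cons, pvStepB, pvStepA]
    split_ifs with h1 h2
    · exact ih seen d p f
    · exact ih seen d p f
    · exact ih _ _ p f

-- With nonempty `current`, B's prefix/fuzzy lists are the two filters of A's deduped list.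
lemma pvStepB_nonempty (current : String) (hc : ¬ current = "") (cs : List String) :
    ∀ (seen : PySem.Set String) (d p f : List String),
    cs.foldl (pvStepB current) (seen, d, p, f) =
      ((cs.foldl pvStepA ([], seen)).2, d,
       p ++ ((cs.foldl pvStepA ([], seen)).1).filter (fun v => PySem.Str.startswith (PySem.Str.lower v) current),
       f ++ ((cs.foldl pvStepA ([], seen)).1).filter (fun v => PySem.Str.isIn current (PySem.Str.lower v) && !(PySem.Str.startswith (PySem.Str.lower v) current))) := by
  induction cs with
  | nil => intro seen d p f; simp
  | cons c cs ih =>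
    intro seen d p f
    simp only [List.foldl_cons, pvStepB, pvStepA]
    split_ifs with h1 h2 h3 h4
    · exact ih seen d p f
    · exact ih seen d p f
    · rw [ih _ _ _ _]
      simp only [List.nil_append]
      rw [pvStepA_acc cs [PySem.Str.strip c]]
      simp at h3
      simp [h3]
    · rw [ih _ _ _ _]
      simp only [List.nil_append]
      rw [pvStepA_acc cs [PySem.Str.strip c]]
      simp at h3
      simp at h4
      simp [h3, h4]
    · rw [ih _ _ _ _]
      simp only [List.nil_append]
      rw [pvStepA_acc cs [PySem.Str.strip c]]
      simp at h3
      simp at h4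
      simp [h3, h4]

-- On elements of deduped, membership in the prefix filter is just the prefix predicate.
lemma pv_fuzzy_pred (current : String) (D : List String) :
    D.filter (fun v => PySem.Str.isIn current (PySem.Str.lower v) && !((D.filter (fun v => PySem.Str.startswith (PySem.Str.lower v) current)).contains v)) =
      D.filter (fun v => PySem.Str.isIn current (PySem.Str.lower v) && !(PySem.Str.startswith (PySem.Str.lower v) current)) := by
  apply List.filter_congr
  intro v hv
  by_cases h : PySem.Str.startswith (PySem.Str.lower v) current
  all_goals simp at h
  all_goals simp [h, hv, List.mem_filter]

-- ===== VERDICT (by name: the statement is the Claim_ definition above) =====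
theorem normalize_completion_candidates_py_spec : Claim_equal_normalize_completion_candidates_py := by
  intro candidates current_value _
  unfold Spec_normalize_completion_candidates_py
  unfold normalize_completion_candidates_py normalize_completion_candidates_py_alt
  by_cases hc : PySem.Str.lower (PySem.Str.strip current_value) = ""
  · simp only [hc, pvStepB_empty]
    simp
  · simp only [pvStepB_nonempty _ hc, if_neg hc, List.nil_append]
    rw [← pv_fuzzy_pred]
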